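-- pv_equiv track=rewrite | github.com/ayazkhan27/cyclic | GPTAsymmetricDEMO.py | get_minimal_movements
-- ===== SOURCE A (Python) =====
-- def get_minimal_movements(cyclic_sequence, group_length):
--     sequence_length = len(cyclic_sequence)
--     digit_positions = {}
--
--     # Map each group in the sequence to its positions
--     for i in range(sequence_length):
--         group = cyclic_sequence[i:i + group_length]
--         if len(group) == group_length:
--             digit_positions.setdefault(group, []).append(i)
--         else:
--             wrap_around_group = cyclic_sequence[i:] + cyclic_sequence[:group_length - len(group)]
--             digit_positions.setdefault(wrap_around_group, []).append(i)
--
--     # Generate minimal movements between sequences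
--     movements = []
--     superposition_points = []
--
--     groups = list(digit_positions.keys())
--     start_sequence = groups[0]
--
--     for i, target_sequence in enumerate(groups):
--         start_positions = digit_positions[start_sequence]
--         target_positions = digit_positions[target_sequence]
--
--         min_movement_value = sequence_length
--         min_movements = []
--
--         for start_pos in start_positions:
--             for target_pos in target_positions:
--                 clockwise_movement = (target_pos - start_pos) % sequence_length
--                 anticlockwise_movement = (start_pos - target_pos) % sequence_length
--
--                 if clockwise_movement < min_movement_value:
--                     min_movements = [clockwise_movement]
--                     min_movement_value = clockwise_movement
--                 elif clockwise_movement == min_movement_value: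
--                     min_movements.append(clockwise_movement)
--
--                 if anticlockwise_movement < min_movement_value:
--                     min_movements = [-anticlockwise_movement]
--                     min_movement_value = anticlockwise_movement
--                 elif anticlockwise_movement == min_movement_value:
--                     min_movements.append(-anticlockwise_movement)
--
--         if len(min_movements) > 1:
--             superposition_points.append(i)
--         movements.append(min_movements)
--
--     return movements, superposition_points
-- ===== SOURCE B (Python) =====
-- def get_minimal_movements(cyclic_sequence, group_length):
--     n = len(cyclic_sequence)
--     positions = {}
--     for i in range(n):
--         group = cyclic_sequence[i:i + group_length]
--         if len(group) != group_length:
--             group = cyclic_sequence[i:] + cyclic_sequence[:group_length - len(group)]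
--         positions.setdefault(group, []).append(i)
--
--     groups = list(positions)
--     start_positions = positions[groups[0]]
--
--     movements = []
--     superposition_points = []
--     for i, g in enumerate(groups):
--         tgt = positions[g]
--         # pass 1: minimal circular distance (the anticlockwise distance is n - d for d > 0)
--         m = n
--         for s in start_positions:
--             for t in tgt:
--                 d = (t - s) % n
--                 if d + d > n:
--                     d = n - d
--                 if d < m:
--                     m = d
--         # pass 2: emit the tied signed movements, clockwise entry first, in pair order
--         mins = []
--         for s in start_positions:
--             for t in tgt:
--                 cw = (t - s) % n
--                 acw = n - cw if cw != 0 else 0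
--                 if cw == m:
--                     mins.append(cw)
--                 if acw == m:
--                     mins.append(-acw)
--         if len(mins) > 1:
--             superposition_points.append(i)
--         movements.append(mins)
--     return movements, superposition_points
-- ===== Notes on version B (the rewrite author's own statement) =====
-- stated objective: simpler
-- what changed: A's mutable track-min-reset-append inner loop is replaced by two stateless passes over the (start, target) position pairs: pass 1 computes the minimal circular distance with a plain running minimum (one mod per pair), pass 2 emits the tied signed movements in the same pair order against that precomputed minimum.
import Mathlib
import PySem

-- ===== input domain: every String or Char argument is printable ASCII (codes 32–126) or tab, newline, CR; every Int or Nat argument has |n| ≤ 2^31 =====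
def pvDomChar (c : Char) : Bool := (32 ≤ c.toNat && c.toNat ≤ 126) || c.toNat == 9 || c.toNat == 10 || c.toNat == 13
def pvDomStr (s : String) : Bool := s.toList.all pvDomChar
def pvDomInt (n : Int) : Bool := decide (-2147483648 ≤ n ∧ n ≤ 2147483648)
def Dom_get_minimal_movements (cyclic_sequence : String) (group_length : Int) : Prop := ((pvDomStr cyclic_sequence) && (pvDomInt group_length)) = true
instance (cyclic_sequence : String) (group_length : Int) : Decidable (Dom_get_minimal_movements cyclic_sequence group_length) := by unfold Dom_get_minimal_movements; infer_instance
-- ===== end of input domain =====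

-- B replaces A's mutable track-min-reset-append inner loop by two stateless passes over the
-- (start, target) pairs: compute the minimum circular distance, then emit the tied signed moves
-- in the same order (objective: simpler).

-- ===== PORT A =====
-- dict build: `digit_positions.setdefault(g, []).append(i)` is modelled by
-- `d.insert g (d.getD g [] ++ [i])` — absent key appends at the end, present key keeps its position.
def aGroupStep (s : String) (gl : Int) (d : PySem.Dict String (List Int)) (i : Int) : PySem.Dict String (List Int) :=
  let group := PySem.Str.slice s (some i) (some (i + gl))
  if PySem.Str.len group = gl then
    d.insert group (d.getD group [] ++ [i])
  else
    let wrap := PySem.Str.slice s (some i) none ++ PySem.Str.slice s none (some (gl - PySem.Str.len group))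
    d.insert wrap (d.getD wrap [] ++ [i])

-- the body of A's inner double loop: the two if/elif chains updating (min_movement_value, min_movements)
def aPairStep (n : Int) (st : Int × List Int) (start_pos target_pos : Int) : Int × List Int :=
  let cw := PySem.Int.mod (target_pos - start_pos) n
  let acw := PySem.Int.mod (start_pos - target_pos) n
  let st1 := if cw < st.1 then (cw, [cw]) else if cw = st.1 then (st.1, st.2 ++ [cw]) else st
  if acw < st1.1 then (acw, [-acw]) else if acw = st1.1 then (st1.1, st1.2 ++ [-acw]) else st1

def get_minimal_movements (cyclic_sequence : String) (group_length : Int) : List (List Int) × List Int :=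
  let n := PySem.Str.len cyclic_sequence
  let d := (PySem.List.pyRange 0 n 1).foldl (aGroupStep cyclic_sequence group_length) PySem.Dict.empty
  let groups := d.keys
  let start_sequence := PySem.List.pyGetD groups 0 ""   -- groups[0]: IndexError on "" is excluded by Pre_
  (PySem.List.enumerate groups 0).foldl (fun acc p =>
    let start_positions := d.getD start_sequence []     -- key always present (groups[0] ∈ keys)
    let target_positions := d.getD p.2 []               -- key always present (p.2 ∈ keys)
    let r := start_positions.foldl
      (fun st sp => target_positions.foldl (fun st tp => aPairStep n st sp tp) st) (n, ([] : List Int))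
    (acc.1 ++ [r.2], if (1 : Int) < r.2.length then acc.2 ++ [p.1] else acc.2)) ([], [])

-- ===== PORT B =====
def bGroupStep (s : String) (gl : Int) (d : PySem.Dict String (List Int)) (i : Int) : PySem.Dict String (List Int) :=
  let g0 := PySem.Str.slice s (some i) (some (i + gl))
  let g := if PySem.Str.len g0 ≠ gl then
    PySem.Str.slice s (some i) none ++ PySem.Str.slice s none (some (gl - PySem.Str.len g0)) else g0
  d.insert g (d.getD g [] ++ [i])   -- positions.setdefault(g, []).append(i)

-- the body of B's per-group block: pass 1 computes the minimal circular distance m,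
-- pass 2 emits the tied signed movements
def bGroupMovements (n : Int) (start_positions tgt : List Int) : List Int :=
  let m := start_positions.foldl (fun m sp => tgt.foldl (fun m tp =>
      let d := PySem.Int.mod (tp - sp) n
      let d := if d + d > n then n - d else d
      if d < m then d else m) m) n
  start_positions.foldl (fun mins sp => tgt.foldl (fun mins tp =>
      let cw := PySem.Int.mod (tp - sp) n
      let acw := if cw ≠ 0 then n - cw else 0
      let mins := if cw = m then mins ++ [cw] else mins
      if acw = m then mins ++ [-acw] else mins) mins) []

def get_minimal_movements_alt (cyclic_sequence : String) (group_length : Int) : List (List Int) × List Int :=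
  let n := PySem.Str.len cyclic_sequence
  let d := (PySem.List.pyRange 0 n 1).foldl (bGroupStep cyclic_sequence group_length) PySem.Dict.empty
  let groups := d.keys
  let start_positions := d.getD (PySem.List.pyGetD groups 0 "") []   -- groups[0]: IndexError on "" is excluded by Pre_
  (PySem.List.enumerate groups 0).foldl (fun acc p =>
    let mins := bGroupMovements n start_positions (d.getD p.2 [])
    (acc.1 ++ [mins], if (1 : Int) < mins.length then acc.2 ++ [p.1] else acc.2)) ([], [])

-- ===== PRECONDITION & SPEC =====
-- Pre_ excludes the empty string, on which A raises (groups[0] → IndexError); B raises there too.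
def Pre_get_minimal_movements (cyclic_sequence : String) (group_length : Int) : Prop :=
  cyclic_sequence ≠ ""
instance (cyclic_sequence : String) (group_length : Int) : Decidable (Pre_get_minimal_movements cyclic_sequence group_length) := by unfold Pre_get_minimal_movements; infer_instance

def pvWitness_get_minimal_movements : String × Int := ("abab", 2)

def Spec_get_minimal_movements (cyclic_sequence : String) (group_length : Int) (out : List (List Int) × List Int) : Prop := out = get_minimal_movements_alt cyclic_sequence group_length
instance (cyclic_sequence : String) (group_length : Int) (out : List (List Int) × List Int) : Decidable (Spec_get_minimal_movements cyclic_sequence group_length out) := by unfold Spec_get_minimal_movements; infer_instance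

-- ===== CLAIM (what is proved, stated in full; the proofs are below) =====
def Claim_equal_get_minimal_movements : Prop := ∀ (cyclic_sequence : String) (group_length : Int), Dom_get_minimal_movements cyclic_sequence group_length → Pre_get_minimal_movements cyclic_sequence group_length → Spec_get_minimal_movements cyclic_sequence group_length (get_minimal_movements cyclic_sequence group_length)

-- ===== LEMMAS AND PROOFS =====

-- clockwise / anticlockwise circular distances of a (start, target) pair (proof abbreviations)
def bCw (n : Int) (q : Int × Int) : Int := PySem.Int.mod (q.2 - q.1) n
def bAcw (n : Int) (q : Int × Int) : Int := PySem.Int.mod (q.1 - q.2) n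


-- the two dict-building steps are the same function (A: if/else, B: conditional reassignment)
lemma groupStep_eq (s : String) (gl : Int) : aGroupStep s gl = bGroupStep s gl := by
  funext d i
  simp only [aGroupStep, bGroupStep, ne_eq]
  by_cases h : PySem.Str.len (PySem.Str.slice s (some i) (some (i + gl))) = gl
  · rw [if_pos h, if_neg (not_not_intro h)]
  · rw [if_neg h, if_pos h]

-- A's inner loop, abstracted: a stream of (distance, signed entry) items folded by pvStep
def pvStep (st : Int × List Int) (p : Int × Int) : Int × List Int :=
  if p.1 < st.1 then (p.1, [p.2]) else if p.1 = st.1 then (st.1, st.2 ++ [p.2]) else st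

def pvStream (n : Int) (pairs : List (Int × Int)) : List (Int × Int) :=
  pairs.flatMap (fun q => [(bCw n q, bCw n q), (bAcw n q, -(bAcw n q))])

def pvMin (l : List (Int × Int)) (m0 : Int) : Int := l.foldl (fun a p => min a p.1) m0

lemma aPairStep_eq (n : Int) (st : Int × List Int) (sp tp : Int) :
    aPairStep n st sp tp =
      pvStep (pvStep st (bCw n (sp, tp), bCw n (sp, tp))) (bAcw n (sp, tp), -(bAcw n (sp, tp))) := rfl

lemma pvStream_append (n : Int) (x y : List (Int × Int)) :
    pvStream n (x ++ y) = pvStream n x ++ pvStream n y := by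
  simp [pvStream]

lemma inner_row (n sp : Int) (tgt : List Int) (init : Int × List Int) :
    tgt.foldl (fun st tp => aPairStep n st sp tp) init
      = (pvStream n (tgt.map (fun tp => (sp, tp)))).foldl pvStep init := by
  induction tgt generalizing init with
  | nil => rfl
  | cons tp ttl ih =>
    rw [List.foldl_cons, ih, List.map_cons]
    show _ = List.foldl pvStep init (pvStream n ([(sp, tp)] ++ ttl.map (fun tp => (sp, tp))))
    rw [pvStream_append, List.foldl_append, aPairStep_eq]
    rfl

lemma nested_eq (n : Int) (start tgt : List Int) (init : Int × List Int) :
    start.foldl (fun st sp => tgt.foldl (fun st tp => aPairStep n st sp tp) st) init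
      = (pvStream n (start.flatMap (fun sp => tgt.map (fun tp => (sp, tp))))).foldl pvStep init := by
  induction start generalizing init with
  | nil => rfl
  | cons sp rest ih =>
    rw [List.foldl_cons, ih, List.flatMap_cons, pvStream_append, List.foldl_append, inner_row]

lemma pvMin_le (l : List (Int × Int)) (m0 : Int) : pvMin l m0 ≤ m0 := by
  induction l generalizing m0 with
  | nil => simp [pvMin]
  | cons p t ih =>
    have := ih (min m0 p.1)
    simp only [pvMin, List.foldl_cons] at this ⊢
    exact le_trans this (min_le_left _ _)

-- characterisation of A's track-min-reset-append loop
lemma foldl_pvStep (l : List (Int × Int)) (m0 : Int) (acc : List Int) :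
    l.foldl pvStep (m0, acc) =
      (pvMin l m0,
       (if pvMin l m0 = m0 then acc else []) ++ (l.filter (fun p => p.1 = pvMin l m0)).map Prod.snd) := by
  induction l generalizing m0 acc with
  | nil => simp [pvMin]
  | cons p t ih =>
    have hle : pvMin t (min m0 p.1) ≤ min m0 p.1 := pvMin_le t _
    have hmin : pvMin (p :: t) m0 = pvMin t (min m0 p.1) := rfl
    rw [List.foldl_cons, hmin, List.filter_cons]
    simp only [decide_eq_true_eq]
    rcases lt_trichotomy p.1 m0 with hlt | heq | hgt
    · have h1 : pvStep (m0, acc) p = (p.1, [p.2]) := by simp [pvStep, hlt]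
      have h2 : min m0 p.1 = p.1 := by omega
      rw [h1, ih, h2]
      have hne : ¬ pvMin t p.1 = m0 := by have := pvMin_le t p.1; omega
      rw [if_neg hne]
      by_cases hp : p.1 = pvMin t p.1
      · rw [if_pos hp.symm, if_pos hp]
        simp
      · rw [if_neg (fun hh => hp hh.symm), if_neg hp, List.nil_append]
    · have h1 : pvStep (m0, acc) p = (m0, acc ++ [p.2]) := by simp [pvStep, heq]
      have h2 : min m0 p.1 = m0 := by omega
      rw [h1, ih, h2]
      by_cases hm : pvMin t m0 = m0
      · have hp : p.1 = pvMin t m0 := by omega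
        rw [if_pos hm, if_pos hm, if_pos hp]
        simp
      · have hp : ¬ p.1 = pvMin t m0 := by
          have := pvMin_le t m0; omega
        rw [if_neg hm, if_neg hm, if_neg hp]
    · have h1 : pvStep (m0, acc) p = (m0, acc) := by
        simp only [pvStep]
        rw [if_neg (by omega), if_neg (by omega)]
      have h2 : min m0 p.1 = m0 := by omega
      have hp : ¬ p.1 = pvMin t m0 := by
        have := pvMin_le t m0; omega
      rw [h1, ih, h2, if_neg hp]

-- the minimum of the stream seeded with n is B's min over the per-pair minima
lemma pvMin_stream (n : Int) (pairs : List (Int × Int)) (m0 : Int) :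
    pvMin (pvStream n pairs) m0
      = (pairs.map (fun q => min (bCw n q) (bAcw n q))).foldl min m0 := by
  induction pairs generalizing m0 with
  | nil => rfl
  | cons q t ih =>
    show pvMin (pvStream n ([q] ++ t)) m0 = _
    rw [pvStream_append, List.map_cons, List.foldl_cons]
    show pvMin (pvStream n t) (min (min m0 (bCw n q)) (bAcw n q)) = _
    rw [ih, min_assoc]

-- the filtered stream is B's conditional-emission pass
lemma stream_filter (n m : Int) (pairs : List (Int × Int)) :
    ((pvStream n pairs).filter (fun p => p.1 = m)).map Prod.snd
      = pairs.flatMap (fun q =>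
          (if bCw n q = m then [bCw n q] else []) ++ (if bAcw n q = m then [-(bAcw n q)] else [])) := by
  induction pairs with
  | nil => rfl
  | cons q t ih =>
    show ((pvStream n ([q] ++ t)).filter _).map _ = _
    rw [pvStream_append, List.filter_append, List.map_append, ih, List.flatMap_cons]
    congr 1
    by_cases h1 : bCw n q = m <;> by_cases h2 : bAcw n q = m <;>
      simp [pvStream, h1, h2]

-- anticlockwise distance: B's arithmetic form equals A's second mod
lemma acw_eq (n : Int) (hn : 0 < n) (sp tp : Int) :
    (if PySem.Int.mod (tp - sp) n ≠ 0 then n - PySem.Int.mod (tp - sp) n else 0)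
      = bAcw n (sp, tp) := by
  have h1 : PySem.Int.mod (tp - sp) n = (tp - sp) % n := PySem.Int.mod_eq_emod_of_pos hn
  have h2 : bAcw n (sp, tp) = (sp - tp) % n := PySem.Int.mod_eq_emod_of_pos hn
  rw [h1, h2, show sp - tp = -(tp - sp) by ring, Int.neg_emod]
  have hna : (n.natAbs : Int) = n := Int.natAbs_of_nonneg hn.le
  by_cases h0 : (tp - sp) % n = 0
  · rw [if_neg (not_not_intro h0), if_pos (Int.dvd_iff_emod_eq_zero.mpr h0)]
  · rw [if_pos h0, if_neg (fun hd => h0 (Int.dvd_iff_emod_eq_zero.mp hd)), hna]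

-- per-pair minimum: B's one-mod form equals min of the two mods
lemma fmin_eq (n : Int) (hn : 0 < n) (sp tp : Int) :
    min (PySem.Int.mod (tp - sp) n) (n - PySem.Int.mod (tp - sp) n)
      = min (bCw n (sp, tp)) (bAcw n (sp, tp)) := by
  rw [← acw_eq n hn sp tp]
  show min (PySem.Int.mod (tp - sp) n) _ = min (PySem.Int.mod (tp - sp) n) _
  by_cases h0 : PySem.Int.mod (tp - sp) n = 0
  · rw [if_neg (not_not_intro h0), h0]
    omega
  · rw [if_pos h0]

-- per-pair body of B's pass 1 equals folding min over the two circular distances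
lemma dmin_eq (n : Int) (hn : 0 < n) (sp tp m : Int) :
    (if (if PySem.Int.mod (tp - sp) n + PySem.Int.mod (tp - sp) n > n
          then n - PySem.Int.mod (tp - sp) n else PySem.Int.mod (tp - sp) n) < m
     then (if PySem.Int.mod (tp - sp) n + PySem.Int.mod (tp - sp) n > n
          then n - PySem.Int.mod (tp - sp) n else PySem.Int.mod (tp - sp) n) else m)
      = min m (min (bCw n (sp, tp)) (bAcw n (sp, tp))) := by
  have hd : (if PySem.Int.mod (tp - sp) n + PySem.Int.mod (tp - sp) n > n
      then n - PySem.Int.mod (tp - sp) n else PySem.Int.mod (tp - sp) n)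
      = min (bCw n (sp, tp)) (bAcw n (sp, tp)) := by
    rw [← fmin_eq n hn sp tp]
    split_ifs <;> omega
  rw [hd]
  split_ifs <;> omega

-- B's pass 1 computes the minimum of A's movement stream
lemma pass1_eq (n : Int) (hn : 0 < n) (start tgt : List Int) :
    start.foldl (fun m sp => tgt.foldl (fun m tp =>
        if (if PySem.Int.mod (tp - sp) n + PySem.Int.mod (tp - sp) n > n
             then n - PySem.Int.mod (tp - sp) n else PySem.Int.mod (tp - sp) n) < m
        then (if PySem.Int.mod (tp - sp) n + PySem.Int.mod (tp - sp) n > n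
             then n - PySem.Int.mod (tp - sp) n else PySem.Int.mod (tp - sp) n) else m) m) n
      = pvMin (pvStream n (start.flatMap (fun sp => tgt.map (fun tp => (sp, tp))))) n := by
  have hbody : (fun (m : Int) sp => tgt.foldl (fun m tp =>
      if (if PySem.Int.mod (tp - sp) n + PySem.Int.mod (tp - sp) n > n
           then n - PySem.Int.mod (tp - sp) n else PySem.Int.mod (tp - sp) n) < m
      then (if PySem.Int.mod (tp - sp) n + PySem.Int.mod (tp - sp) n > n
           then n - PySem.Int.mod (tp - sp) n else PySem.Int.mod (tp - sp) n) else m) m)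
      = (fun (m : Int) sp => tgt.foldl (fun m tp =>
          min m (min (bCw n (sp, tp)) (bAcw n (sp, tp)))) m) := by
    funext m sp
    have h : (fun (m : Int) tp =>
        if (if PySem.Int.mod (tp - sp) n + PySem.Int.mod (tp - sp) n > n
             then n - PySem.Int.mod (tp - sp) n else PySem.Int.mod (tp - sp) n) < m
        then (if PySem.Int.mod (tp - sp) n + PySem.Int.mod (tp - sp) n > n
             then n - PySem.Int.mod (tp - sp) n else PySem.Int.mod (tp - sp) n) else m)
        = (fun (m : Int) tp => min m (min (bCw n (sp, tp)) (bAcw n (sp, tp)))) := by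
      funext m tp
      exact dmin_eq n hn sp tp m
    rw [h]
  rw [hbody, pvMin_stream, List.foldl_map, List.foldl_flatMap]
  congr 1
  funext a sp
  rw [List.foldl_map]

-- B's pass-2 inner row, as a flatMap over the row's pairs
lemma emit_row (n m : Int) (hn : 0 < n) (sp : Int) (tgt : List Int) (acc : List Int) :
    tgt.foldl (fun mins tp =>
        if (if PySem.Int.mod (tp - sp) n ≠ 0 then n - PySem.Int.mod (tp - sp) n else 0) = m then
          (if PySem.Int.mod (tp - sp) n = m then mins ++ [PySem.Int.mod (tp - sp) n] else mins) ++
            [-(if PySem.Int.mod (tp - sp) n ≠ 0 then n - PySem.Int.mod (tp - sp) n else 0)]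
        else
          (if PySem.Int.mod (tp - sp) n = m then mins ++ [PySem.Int.mod (tp - sp) n] else mins)) acc
      = acc ++ (tgt.map (fun tp => (sp, tp))).flatMap (fun q =>
          (if bCw n q = m then [bCw n q] else []) ++ (if bAcw n q = m then [-(bAcw n q)] else [])) := by
  have hbody : (fun (mins : List Int) tp =>
      if (if PySem.Int.mod (tp - sp) n ≠ 0 then n - PySem.Int.mod (tp - sp) n else 0) = m then
        (if PySem.Int.mod (tp - sp) n = m then mins ++ [PySem.Int.mod (tp - sp) n] else mins) ++
          [-(if PySem.Int.mod (tp - sp) n ≠ 0 then n - PySem.Int.mod (tp - sp) n else 0)]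
      else
        (if PySem.Int.mod (tp - sp) n = m then mins ++ [PySem.Int.mod (tp - sp) n] else mins))
      = (fun mins tp => mins ++
          ((if bCw n (sp, tp) = m then [bCw n (sp, tp)] else []) ++
           (if bAcw n (sp, tp) = m then [-(bAcw n (sp, tp))] else []))) := by
    funext mins tp
    rw [acw_eq n hn sp tp]
    have hcw : bCw n (sp, tp) = PySem.Int.mod (tp - sp) n := rfl
    rw [← hcw]
    by_cases h1 : bCw n (sp, tp) = m <;> by_cases h2 : bAcw n (sp, tp) = m <;>
      simp [h1, h2]
  rw [hbody, PySem.List.foldl_append_eq_flatMap, List.flatMap_map]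

-- B's pass-2 double loop, as a flatMap over the pair list
lemma emit_eq (n m : Int) (hn : 0 < n) (start tgt : List Int) :
    start.foldl (fun mins sp => tgt.foldl (fun mins tp =>
        if (if PySem.Int.mod (tp - sp) n ≠ 0 then n - PySem.Int.mod (tp - sp) n else 0) = m then
          (if PySem.Int.mod (tp - sp) n = m then mins ++ [PySem.Int.mod (tp - sp) n] else mins) ++
            [-(if PySem.Int.mod (tp - sp) n ≠ 0 then n - PySem.Int.mod (tp - sp) n else 0)]
        else
          (if PySem.Int.mod (tp - sp) n = m then mins ++ [PySem.Int.mod (tp - sp) n] else mins)) mins) []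
      = (start.flatMap (fun sp => tgt.map (fun tp => (sp, tp)))).flatMap (fun q =>
          (if bCw n q = m then [bCw n q] else []) ++ (if bAcw n q = m then [-(bAcw n q)] else [])) := by
  have hfun : (fun (mins : List Int) sp => tgt.foldl (fun mins tp =>
      if (if PySem.Int.mod (tp - sp) n ≠ 0 then n - PySem.Int.mod (tp - sp) n else 0) = m then
        (if PySem.Int.mod (tp - sp) n = m then mins ++ [PySem.Int.mod (tp - sp) n] else mins) ++
          [-(if PySem.Int.mod (tp - sp) n ≠ 0 then n - PySem.Int.mod (tp - sp) n else 0)]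
      else
        (if PySem.Int.mod (tp - sp) n = m then mins ++ [PySem.Int.mod (tp - sp) n] else mins)) mins)
      = (fun mins sp => mins ++ (tgt.map (fun tp => (sp, tp))).flatMap (fun q =>
          (if bCw n q = m then [bCw n q] else []) ++ (if bAcw n q = m then [-(bAcw n q)] else []))) := by
    funext mins sp
    exact emit_row n m hn sp tgt mins
  rw [hfun, PySem.List.foldl_append_eq_flatMap, List.nil_append, List.flatMap_assoc]

-- per-group: A's inner double loop produces exactly B's two-pass list
lemma inner_eq (n : Int) (hn : 0 < n) (start tgt : List Int) :
    (start.foldl (fun st sp => tgt.foldl (fun st tp => aPairStep n st sp tp) st) (n, ([] : List Int))).2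
      = bGroupMovements n start tgt := by
  rw [nested_eq, foldl_pvStep]
  simp only [bGroupMovements]
  rw [emit_eq _ _ hn, pass1_eq n hn]
  have hz : (if pvMin (pvStream n (start.flatMap (fun sp => tgt.map (fun tp => (sp, tp))))) n = n
      then ([] : List Int) else []) = [] := by
    split <;> rfl
  rw [hz, List.nil_append]
  exact stream_filter n _ _

-- ===== VERDICT (by name: the statement is the Claim_ definition above) =====
theorem get_minimal_movements_spec : Claim_equal_get_minimal_movements := by
  intro s gl _ hpre
  have hn : 0 < PySem.Str.len s := by
    rw [PySem.Str.len_eq]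
    have h0 : s.toList ≠ [] := fun h => hpre (String.toList_eq_nil_iff.mp h)
    cases h : s.toList with
    | nil => exact absurd h h0
    | cons c t => simp
  simp only [Spec_get_minimal_movements, get_minimal_movements, get_minimal_movements_alt,
    groupStep_eq]
  congr 1
  funext acc p
  rw [inner_eq (PySem.Str.len s) hn]
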